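-- pv_equiv track=rewrite | github.com/meowvietnam/DSA_23-10-2025_DinhHoangLong_B23DCCC102 | Code_23-10-2025_DinhHoangLong_B23DCCC102/5.py | solution
-- ===== SOURCE A (Python) =====
-- def solution(board):
--     N = len(board)
--     row_avg = [sum(board[i]) // N for i in range(N)]
--     col_avg = [sum(board[j][i] for j in range(N)) // N for i in range(N)]
--     diag1 = sum(board[i][i] for i in range(N)) // N
--     diag2 = sum(board[i][N - 1 - i] for i in range(N)) // N
--     all_avg = row_avg + col_avg + [diag1, diag2]
--     return max(all_avg) + min(all_avg)
-- ===== SOURCE B (Python) =====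
-- def solution(board):
--     N = len(board)
--     col_sums = [0] * N
--     row_avgs = []
--     d1 = d2 = 0
--     for i, row in enumerate(board):
--         row_avgs.append(sum(row) // N)
--         col_sums = [c + v for c, v in zip(col_sums, row)]
--         d1 += row[i]
--         d2 += row[N - 1 - i]
--     avgs = row_avgs + [c // N for c in col_sums] + [d1 // N, d2 // N]
--     return max(avgs) + min(avgs)
-- ===== Notes on version B (the rewrite author's own statement) =====
-- stated objective: alternative
-- what changed: Replaces A's four separate index-based passes (per-row sums, N per-column generator scans, two diagonal scans) by a single pass over the rows that keeps a running column-sum vector via zip and accumulates both diagonals on the fly.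
import Mathlib
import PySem

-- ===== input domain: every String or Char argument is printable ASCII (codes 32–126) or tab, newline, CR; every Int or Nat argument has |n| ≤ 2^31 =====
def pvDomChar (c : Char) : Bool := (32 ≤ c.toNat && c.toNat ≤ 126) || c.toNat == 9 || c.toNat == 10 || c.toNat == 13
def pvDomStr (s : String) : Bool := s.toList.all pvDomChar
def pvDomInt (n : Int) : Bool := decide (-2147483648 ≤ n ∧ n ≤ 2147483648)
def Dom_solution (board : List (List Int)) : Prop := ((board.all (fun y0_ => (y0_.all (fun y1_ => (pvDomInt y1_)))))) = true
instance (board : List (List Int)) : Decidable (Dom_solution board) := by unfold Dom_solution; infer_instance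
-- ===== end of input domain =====

-- B is a single pass over the rows keeping a running column-sum vector, instead of A's four separate index-based passes.

-- ===== PORT A =====
def solution (board : List (List Int)) : Int :=
  let N := board.length
  let rowAvg := (List.range N).map (fun (i : Nat) =>
    PySem.Int.floordiv ((PySem.List.pyGet? board (i : Int)).getD []).sum (N : Int))
  let colAvg := (List.range N).map (fun (i : Nat) =>
    PySem.Int.floordiv
      (((List.range N).map (fun (j : Nat) =>
        (PySem.List.pyGet? ((PySem.List.pyGet? board (j : Int)).getD []) (i : Int)).getD 0)).sum)
      (N : Int))
  let diag1 := PySem.Int.floordiv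
    (((List.range N).map (fun (i : Nat) =>
      (PySem.List.pyGet? ((PySem.List.pyGet? board (i : Int)).getD []) (i : Int)).getD 0)).sum)
    (N : Int)
  let diag2 := PySem.Int.floordiv
    (((List.range N).map (fun (i : Nat) =>
      (PySem.List.pyGet? ((PySem.List.pyGet? board (i : Int)).getD []) ((N : Int) - 1 - (i : Int))).getD 0)).sum)
    (N : Int)
  let allAvg := rowAvg ++ colAvg ++ [diag1, diag2]
  (PySem.List.max? allAvg (fun y => y)).getD 0 + (PySem.List.min? allAvg (fun y => y)).getD 0

-- ===== PORT B =====
-- loop body of B's single pass: state = (row_avgs, col_sums, d1, d2), element = (i, row)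
def altStep (N : Nat) (st : List Int × List Int × Int × Int) (p : Int × List Int) :
    List Int × List Int × Int × Int :=
  (st.1 ++ [PySem.Int.floordiv p.2.sum (N : Int)],
   List.zipWith (· + ·) st.2.1 p.2,
   st.2.2.1 + (PySem.List.pyGet? p.2 p.1).getD 0,
   st.2.2.2 + (PySem.List.pyGet? p.2 ((N : Int) - 1 - p.1)).getD 0)

def solution_alt (board : List (List Int)) : Int :=
  let N := board.length
  let st := (PySem.List.enumerate board 0).foldl (altStep N) ([], List.replicate N 0, 0, 0)
  let avgs := st.1 ++ st.2.1.map (fun c => PySem.Int.floordiv c (N : Int)) ++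
    [PySem.Int.floordiv st.2.2.1 (N : Int), PySem.Int.floordiv st.2.2.2 (N : Int)]
  (PySem.List.max? avgs (fun y => y)).getD 0 + (PySem.List.min? avgs (fun y => y)).getD 0

-- ===== PRECONDITION & SPEC =====
-- A raises ZeroDivisionError on the empty board and IndexError when some row is
-- shorter than the number of rows; Pre_ excludes exactly those inputs.
def Pre_solution (board : List (List Int)) : Prop :=
  board ≠ [] ∧ ∀ r ∈ board, board.length ≤ r.length
instance (board : List (List Int)) : Decidable (Pre_solution board) := by
  unfold Pre_solution; infer_instance

def pvWitness_solution : List (List Int) := [[1, 2], [3, 4]]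

def Spec_solution (board : List (List Int)) (out : Int) : Prop := out = solution_alt board
instance (board : List (List Int)) (out : Int) : Decidable (Spec_solution board out) := by
  unfold Spec_solution; infer_instance

-- ===== CLAIM (what is proved, stated in full; the proofs are below) =====
def Claim_equal_solution : Prop := ∀ (board : List (List Int)), Dom_solution board →
  Pre_solution board → Spec_solution board (solution board)

-- ===== LEMMAS AND PROOFS =====

-- reading a list back from its indices
lemma range_map_getD_eq_map {α β : Type} (l : List α) (d : α) (f : α → β) :
    (List.range l.length).map (fun j => f (l[j]?.getD d)) = l.map f := by
  apply List.ext_getElem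
  · simp
  · intro i h1 h2
    simp only [List.length_map] at h2
    simp [List.getElem?_eq_getElem h2]

-- characterization of B's loop
lemma altLoop (N : Nat) (rows : List (List Int)) (s : Nat) (ra cs : List Int) (d1 d2 : Int)
    (hcs : cs.length = N) (hrows : ∀ r ∈ rows, N ≤ r.length) (hs : s + rows.length ≤ N) :
    (PySem.List.enumerate rows (s : Int)).foldl (altStep N) (ra, cs, d1, d2) =
      (ra ++ rows.map (fun r => PySem.Int.floordiv r.sum (N : Int)),
       (List.range N).map (fun j => cs[j]?.getD 0 + (rows.map (fun r => r[j]?.getD 0)).sum),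
       d1 + ((List.range rows.length).map (fun k => ((rows[k]?.getD [])[s + k]?.getD 0))).sum,
       d2 + ((List.range rows.length).map (fun k => ((rows[k]?.getD [])[N - 1 - (s + k)]?.getD 0))).sum) := by
  induction rows generalizing s ra cs d1 d2 with
  | nil =>
    subst hcs
    simp [PySem.List.enumerate_nil]
    simpa using (range_map_getD_eq_map cs 0 (fun x => x)).symm
  | cons r rows ih =>
    rw [PySem.List.enumerate_cons, List.foldl_cons]
    have hr : cs.length ≤ r.length := by
      rw [hcs]; exact hrows r (by simp)
    have hcs' : (List.zipWith (· + ·) cs r).length = N := by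
      simp [List.length_zipWith]; omega
    have hsN : s < N := by simp at hs; omega
    have hcast : ((s : Int) + 1) = (((s + 1 : Nat)) : Int) := by push_cast; ring
    rw [show altStep N (ra, cs, d1, d2) ((s : Int), r) =
        (ra ++ [PySem.Int.floordiv r.sum (N : Int)],
         List.zipWith (· + ·) cs r,
         d1 + (PySem.List.pyGet? r (s : Int)).getD 0,
         d2 + (PySem.List.pyGet? r ((N : Int) - 1 - (s : Int))).getD 0) from rfl]
    rw [hcast, ih (s + 1) _ _ _ _ hcs' (fun x hx => hrows x (by simp [hx])) (by simp at hs ⊢; omega)]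
    have hadd : ∀ k : Nat, s + (k + 1) = (s + 1) + k := by omega
    have hIcast : ((N : Int) - 1 - (s : Int)) = (((N - 1 - s : Nat)) : Int) := by omega
    simp only [Prod.mk.injEq]
    refine ⟨by simp, ?_, ?_, ?_⟩
    · apply List.map_congr_left
      intro j hj
      rw [List.mem_range] at hj
      have hjr : j < r.length := by omega
      have hjc : j < cs.length := by omega
      have hz : j < (List.zipWith (· + ·) cs r).length := by omega
      rw [List.getElem?_eq_getElem hz, List.getElem?_eq_getElem hjc]
      simp [List.getElem_zipWith, List.getElem?_eq_getElem hjr]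
      ring
    · simp only [List.length_cons, List.range_succ_eq_map, List.map_cons, List.map_map,
        List.sum_cons]
      simp only [Function.comp_def, Nat.succ_eq_add_one, List.getElem?_cons_succ,
        List.getElem?_cons_zero, Option.getD_some, Nat.add_zero, PySem.List.pyGet?_natCast]
      rw [show (fun x => (rows[x]?.getD ([] : List Int))[s + (x + 1)]?.getD 0)
          = (fun k => (rows[k]?.getD ([] : List Int))[s + 1 + k]?.getD 0) from
        funext fun k => by rw [hadd k]]
      ring
    · rw [hIcast]
      simp only [List.length_cons, List.range_succ_eq_map, List.map_cons, List.map_map,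
        List.sum_cons]
      simp only [Function.comp_def, Nat.succ_eq_add_one, List.getElem?_cons_succ,
        List.getElem?_cons_zero, Option.getD_some, Nat.add_zero, PySem.List.pyGet?_natCast]
      rw [show (fun x => (rows[x]?.getD ([] : List Int))[N - 1 - (s + (x + 1))]?.getD 0)
          = (fun k => (rows[k]?.getD ([] : List Int))[N - 1 - (s + 1 + k)]?.getD 0) from
        funext fun k => by rw [hadd k]]
      ring

theorem solution_eq (board : List (List Int)) (hp : Pre_solution board) :
    solution board = solution_alt board := by
  obtain ⟨hne, hlen⟩ := hp
  simp only [solution, solution_alt]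
  rw [show PySem.List.enumerate board (0 : Int) = PySem.List.enumerate board (((0 : Nat)) : Int) by
    norm_num]
  rw [altLoop board.length board 0 [] (List.replicate board.length 0) 0 0 (by simp) hlen (by omega)]
  simp only [List.nil_append, List.map_map, Function.comp_def, Nat.zero_add]
  have hrow : List.map (fun (i : Nat) =>
        PySem.Int.floordiv ((PySem.List.pyGet? board (i : Int)).getD []).sum (board.length : Int))
        (List.range board.length)
      = List.map (fun r => PySem.Int.floordiv r.sum (board.length : Int)) board := by
    rw [← range_map_getD_eq_map board ([] : List Int)
      (fun r => PySem.Int.floordiv r.sum (board.length : Int))]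
    exact List.map_congr_left fun i _ => by simp
  have hcol : List.map (fun (i : Nat) =>
        PySem.Int.floordiv
          (List.map (fun (j : Nat) =>
            (PySem.List.pyGet? ((PySem.List.pyGet? board (j : Int)).getD []) (i : Int)).getD 0)
            (List.range board.length)).sum (board.length : Int)) (List.range board.length)
      = List.map (fun (x : Nat) =>
          PySem.Int.floordiv
            ((List.replicate board.length (0 : Int))[x]?.getD 0 +
              (List.map (fun r => r[x]?.getD 0) board).sum)
            (board.length : Int)) (List.range board.length) := by
    apply List.map_congr_left
    intro i hi
    rw [List.mem_range] at hi
    have h1 : List.map (fun (j : Nat) =>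
          (PySem.List.pyGet? ((PySem.List.pyGet? board (j : Int)).getD []) (i : Int)).getD 0)
          (List.range board.length)
        = List.map (fun r => r[i]?.getD 0) board := by
      rw [← range_map_getD_eq_map board ([] : List Int) (fun r => r[i]?.getD 0)]
      exact List.map_congr_left fun j _ => by simp
    rw [h1]
    simp [hi]
  have hd1 : List.map (fun (i : Nat) =>
        (PySem.List.pyGet? ((PySem.List.pyGet? board (i : Int)).getD []) (i : Int)).getD 0)
        (List.range board.length)
      = List.map (fun k => (board[k]?.getD [])[k]?.getD 0) (List.range board.length) :=
    List.map_congr_left fun i _ => by simp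
  have hd2 : List.map (fun (i : Nat) =>
        (PySem.List.pyGet? ((PySem.List.pyGet? board (i : Int)).getD [])
          ((board.length : Int) - 1 - (i : Int))).getD 0) (List.range board.length)
      = List.map (fun k => (board[k]?.getD [])[board.length - 1 - k]?.getD 0)
          (List.range board.length) := by
    apply List.map_congr_left
    intro i hi
    rw [List.mem_range] at hi
    rw [show ((board.length : Int) - 1 - (i : Int)) = (((board.length - 1 - i : Nat)) : Int) by
      omega]
    simp
  rw [hrow, hcol, hd1, hd2]
  simp only [zero_add]

-- ===== VERDICT (by name: the statement is the Claim_ definition above) =====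
theorem solution_spec : Claim_equal_solution := by
  intro board _ hp
  unfold Spec_solution
  exact solution_eq board hp
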